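-- pv_equiv track=rewrite | github.com/mkXultra/mew | src/mew/implement_lane/shell_metadata.py | _read_search_list_hint
-- ===== SOURCE A (Python) =====
-- from typing import Literal
--
-- ReadSearchListHint = Literal["search", "read", "list", "unknown"]
--
-- _SEARCH_COMMANDS = frozenset({"rg", "grep", "ag", "ack", "fd"})
--
-- _LIST_COMMANDS = frozenset({"find", "ls", "tree"})
--
-- _READ_COMMANDS = frozenset({"cat", "head", "tail", "sed", "awk", "file", "stat", "readlink", "wc"})
--
-- def _read_search_list_hint(base_commands: tuple[str, ...]) -> ReadSearchListHint:
--     lowered = {command.casefold() for command in base_commands}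
--     if lowered & _SEARCH_COMMANDS:
--         return "search"
--     if lowered & _LIST_COMMANDS:
--         return "list"
--     if lowered & _READ_COMMANDS:
--         return "read"
--     return "unknown"
-- ===== SOURCE B (Python) =====
-- _RANK = {
--     "rg": 0, "grep": 0, "ag": 0, "ack": 0, "fd": 0,
--     "find": 1, "ls": 1, "tree": 1,
--     "cat": 2, "head": 2, "tail": 2, "sed": 2, "awk": 2,
--     "file": 2, "stat": 2, "readlink": 2, "wc": 2,
-- }
-- _LABELS = ("search", "list", "read", "unknown")
--
--
-- def _read_search_list_hint(base_commands):
--     best = 3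
--     for command in base_commands:
--         r = _RANK.get(command.casefold(), 3)
--         if r < best:
--             best = r
--     return _LABELS[best]
-- ===== Notes on version B (the rewrite author's own statement) =====
-- stated objective: alternative
-- what changed: Replaced A's three sequential set-intersection branches with a single command->rank lookup table and one min-tracking pass over base_commands, indexing a priority->label tuple at the end.
import Mathlib
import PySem

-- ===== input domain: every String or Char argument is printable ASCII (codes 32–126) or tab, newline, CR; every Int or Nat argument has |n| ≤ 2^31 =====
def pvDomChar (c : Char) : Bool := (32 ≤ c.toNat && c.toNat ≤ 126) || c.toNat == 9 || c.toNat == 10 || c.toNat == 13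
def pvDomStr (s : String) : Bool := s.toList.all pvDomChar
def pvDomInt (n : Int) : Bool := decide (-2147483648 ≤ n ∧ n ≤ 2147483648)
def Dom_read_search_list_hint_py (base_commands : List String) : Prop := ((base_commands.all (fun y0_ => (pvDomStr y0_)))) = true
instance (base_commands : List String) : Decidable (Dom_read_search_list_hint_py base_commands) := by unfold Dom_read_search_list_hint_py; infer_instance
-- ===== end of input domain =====

-- B replaces A's three sequential set-intersection branches by a single min-tracking
-- pass over one command->rank table (objective: alternative decomposition, same cost).


-- ===== PORT A =====
-- frozenset literals (only membership is used)
def searchCmds : PySem.Set String := PySem.Set.ofList ["rg", "grep", "ag", "ack", "fd"]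
def listCmds : PySem.Set String := PySem.Set.ofList ["find", "ls", "tree"]
def readCmds : PySem.Set String := PySem.Set.ofList ["cat", "head", "tail", "sed", "awk", "file", "stat", "readlink", "wc"]

-- casefold on the ASCII domain coincides with lower (PySem.Str.lower)
def read_search_list_hint_py (base_commands : List String) : String :=
  let lowered : PySem.Set String := PySem.Set.ofList (base_commands.map PySem.Str.lower)
  if PySem.Set.inter lowered searchCmds ≠ [] then "search"
  else if PySem.Set.inter lowered listCmds ≠ [] then "list"
  else if PySem.Set.inter lowered readCmds ≠ [] then "read"
  else "unknown"

-- ===== PORT B =====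
def rankDict : PySem.Dict String Int := PySem.Dict.ofList
  [("rg", 0), ("grep", 0), ("ag", 0), ("ack", 0), ("fd", 0),
   ("find", 1), ("ls", 1), ("tree", 1),
   ("cat", 2), ("head", 2), ("tail", 2), ("sed", 2), ("awk", 2),
   ("file", 2), ("stat", 2), ("readlink", 2), ("wc", 2)]

def rslLabels : List String := ["search", "list", "read", "unknown"]

def read_search_list_hint_py_alt (base_commands : List String) : String :=
  let best : Int := base_commands.foldl
    (fun best command =>
      let r := rankDict.getD (PySem.Str.lower command) 3
      if r < best then r else best) 3
  -- _LABELS[best]: best is always 0..3, so the index never raises; none is unreachable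
  (PySem.List.pyGet? rslLabels best).getD ""

-- ===== PRECONDITION & SPEC =====
def Spec_read_search_list_hint_py (base_commands : List String) (out : String) : Prop := out = read_search_list_hint_py_alt base_commands
instance (base_commands : List String) (out : String) : Decidable (Spec_read_search_list_hint_py base_commands out) := by unfold Spec_read_search_list_hint_py; infer_instance

-- ===== CLAIM (what is proved, stated in full; the proofs are below) =====
def Claim_equal_read_search_list_hint_py : Prop := ∀ (base_commands : List String), Dom_read_search_list_hint_py base_commands → Spec_read_search_list_hint_py base_commands (read_search_list_hint_py base_commands)

-- ===== LEMMAS AND PROOFS =====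

def rk (s : String) : Int := rankDict.getD s 3

set_option maxHeartbeats 1000000 in
lemma rk_spec (s : String) :
    (rk s = 0 ∨ rk s = 1 ∨ rk s = 2 ∨ rk s = 3)
    ∧ (rk s = 0 ↔ s ∈ searchCmds)
    ∧ (rk s = 1 ↔ s ∈ listCmds)
    ∧ (rk s = 2 ↔ s ∈ readCmds) := by
  have hd : rankDict = PySem.Dict.mk
      [("rg", 0), ("grep", 0), ("ag", 0), ("ack", 0), ("fd", 0),
       ("find", 1), ("ls", 1), ("tree", 1),
       ("cat", 2), ("head", 2), ("tail", 2), ("sed", 2), ("awk", 2),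
       ("file", 2), ("stat", 2), ("readlink", 2), ("wc", 2)] := by decide
  unfold rk
  by_cases e1 : "rg" = s
  · subst e1; decide
  by_cases e2 : "grep" = s
  · subst e2; decide
  by_cases e3 : "ag" = s
  · subst e3; decide
  by_cases e4 : "ack" = s
  · subst e4; decide
  by_cases e5 : "fd" = s
  · subst e5; decide
  by_cases e6 : "find" = s
  · subst e6; decide
  by_cases e7 : "ls" = s
  · subst e7; decide
  by_cases e8 : "tree" = s
  · subst e8; decide
  by_cases e9 : "cat" = s
  · subst e9; decide
  by_cases e10 : "head" = s
  · subst e10; decide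
  by_cases e11 : "tail" = s
  · subst e11; decide
  by_cases e12 : "sed" = s
  · subst e12; decide
  by_cases e13 : "awk" = s
  · subst e13; decide
  by_cases e14 : "file" = s
  · subst e14; decide
  by_cases e15 : "stat" = s
  · subst e15; decide
  by_cases e16 : "readlink" = s
  · subst e16; decide
  by_cases e17 : "wc" = s
  · subst e17; decide
  simp only [hd, PySem.Dict.getD_eq_get?_getD, PySem.Dict.get?_mk_cons, beq_iff_eq,
    searchCmds, listCmds, readCmds, PySem.Set.mem_ofList, List.mem_cons, List.not_mem_nil,
    or_false]
  rw [if_neg e1, if_neg e2, if_neg e3, if_neg e4, if_neg e5, if_neg e6, if_neg e7, if_neg e8, if_neg e9, if_neg e10, if_neg e11, if_neg e12, if_neg e13, if_neg e14, if_neg e15, if_neg e16, if_neg e17]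
  have hz : (PySem.Dict.mk ([] : List (String × Int))).get? s = none := rfl
  rw [hz]
  simp only [Option.getD_none]
  refine ⟨by norm_num, ?_, ?_, ?_⟩ <;> constructor <;> intro hh <;>
    first
      | (exfalso; omega)
      | (exfalso; rcases hh with rfl | rfl | rfl | rfl | rfl | rfl | rfl | rfl | rfl <;>
          simp_all)

def bestOf (l : List String) : Int :=
  l.foldl (fun best command =>
    let r := rk (PySem.Str.lower command)
    if r < best then r else best) 3

lemma foldl_min_general (f : String → Int) :
    ∀ (l : List String) (a b : Int),
      l.foldl (fun x c => min x (f c)) (min a b) = min a (l.foldl (fun x c => min x (f c)) b) := by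
  intro l
  induction l with
  | nil => intro a b; rfl
  | cons c t ih =>
    intro a b
    simp only [List.foldl_cons, min_assoc]
    exact ih a (min b (f c))

lemma bestOf_cons (c : String) (l : List String) :
    bestOf (c :: l) = min (rk (PySem.Str.lower c)) (bestOf l) := by
  unfold bestOf
  simp only [List.foldl_cons]
  have h : ∀ (r b : Int), (if r < b then r else b) = min b r := by
    intro r b; split_ifs <;> omega
  simp only [h]
  have := foldl_min_general (fun c => rk (PySem.Str.lower c)) l (rk (PySem.Str.lower c)) 3
  simpa [min_comm] using this

def anyIn (S : PySem.Set String) (l : List String) : Bool :=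
  l.any (fun c => decide (PySem.Str.lower c ∈ S))

lemma inter_ne_nil_iff (l : List String) (S : PySem.Set String) :
    PySem.Set.inter (PySem.Set.ofList (l.map PySem.Str.lower)) S ≠ [] ↔ anyIn S l = true := by
  rw [← List.isEmpty_eq_false_iff, List.isEmpty_eq_false_iff_exists_mem]
  unfold anyIn
  simp only [PySem.Set.mem_inter, PySem.Set.mem_ofList, List.mem_map, List.any_eq_true,
    decide_eq_true_eq]
  constructor
  · rintro ⟨x, ⟨⟨c, hc, rfl⟩, hS⟩⟩; exact ⟨c, hc, hS⟩
  · rintro ⟨c, hc, hS⟩; exact ⟨_, ⟨c, hc, rfl⟩, hS⟩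

lemma bestOf_char (l : List String) :
    bestOf l = (if anyIn searchCmds l then 0 else if anyIn listCmds l then 1
                else if anyIn readCmds l then 2 else 3) := by
  induction l with
  | nil => simp [bestOf, anyIn]
  | cons c t ih =>
    rw [bestOf_cons, ih]
    have hs := rk_spec (PySem.Str.lower c)
    obtain ⟨hvals, h0, h1, h2⟩ := hs
    simp only [anyIn, List.any_cons, Bool.or_eq_true, decide_eq_true_eq]
    rcases hvals with h | h | h | h <;>
      simp only [h] at * <;>
      [ (have : PySem.Str.lower c ∈ searchCmds := h0.mp h);
        (have : PySem.Str.lower c ∈ listCmds := h1.mp h);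
        (have : PySem.Str.lower c ∈ readCmds := h2.mp h);
        skip ] <;>
      simp_all [anyIn] <;> split_ifs <;> omega

-- ===== VERDICT (by name: the statement is the Claim_ definition above) =====
theorem read_search_list_hint_py_spec : Claim_equal_read_search_list_hint_py := by
  intro l _
  unfold Spec_read_search_list_hint_py read_search_list_hint_py read_search_list_hint_py_alt
  have hb : l.foldl (fun best command =>
      let r := rankDict.getD (PySem.Str.lower command) 3
      if r < best then r else best) 3 = bestOf l := rfl
  rw [hb, bestOf_char l]
  by_cases hS : anyIn searchCmds l = true <;>
  by_cases hL : anyIn listCmds l = true <;>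
  by_cases hR : anyIn readCmds l = true <;>
    simp [inter_ne_nil_iff, hS, hL, hR, rslLabels, PySem.List.pyGet?, PySem.List.pyIdx?]
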